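-- pv_equiv track=rewrite | github.com/prakruthishekar/Competitive-Coding | OA/JP/2.py | deleteProducts
-- ===== SOURCE A (Python) =====
-- from collections import Counter
--
-- def deleteProducts(ids, m):
--     # Count the occurrences of each ID
--     id_counts = Counter(ids)
--
--     # Sort the ID counts in ascending order
--     sorted_counts = sorted(id_counts.values())
--
--     # Calculate the minimum number of different IDs
--     min_ids = len(sorted_counts)
--
--     # Remove IDs with the highest frequencies while m > 0
--     for count in sorted_counts:
--         if m >= count:
--             m -= count
--             min_ids -= 1
--         else:
--             break
--
--     return min_ids
-- ===== SOURCE B (Python) =====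
-- from collections import Counter
--
-- def deleteProducts(ids, m):
--     # Bucket IDs by how often they occur instead of sorting the counts:
--     # freq_of_freq[f] = number of distinct IDs occurring exactly f times.
--     id_counts = Counter(ids)
--     freq_of_freq = Counter(id_counts.values())
--     min_ids = len(id_counts)
--     max_f = max(id_counts.values(), default=0)
--     for f in range(1, max_f + 1):
--         for _ in range(freq_of_freq[f]):
--             if m >= f:
--                 m -= f
--                 min_ids -= 1
--             else:
--                 return min_ids
--     return min_ids
-- ===== Notes on version B (the rewrite author's own statement) =====
-- stated objective: alternative
-- what changed: Replaces sorting the per-ID counts and greedily scanning the sorted list with a frequency-of-frequency bucket table traversed by frequency magnitude 1..max, with an early return where A breaks.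
import Mathlib
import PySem

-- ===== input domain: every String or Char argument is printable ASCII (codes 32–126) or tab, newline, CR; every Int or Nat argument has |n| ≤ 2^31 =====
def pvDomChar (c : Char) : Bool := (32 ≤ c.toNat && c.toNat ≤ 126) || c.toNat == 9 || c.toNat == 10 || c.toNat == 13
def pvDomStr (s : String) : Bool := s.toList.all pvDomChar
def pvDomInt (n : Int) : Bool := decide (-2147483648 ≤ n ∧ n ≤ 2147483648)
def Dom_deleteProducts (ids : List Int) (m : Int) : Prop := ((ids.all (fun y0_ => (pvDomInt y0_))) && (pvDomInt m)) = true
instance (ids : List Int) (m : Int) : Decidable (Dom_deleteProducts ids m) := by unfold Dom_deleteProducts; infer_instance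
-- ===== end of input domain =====

-- B replaces A's sort of the per-ID counts by a frequency-of-frequency bucket table traversed
-- by frequency magnitude 1..max (alternative algorithm, same return value).


-- ===== PORT A =====
-- the 'for count in sorted_counts' loop with its break, state (m, min_ids)
def dpLoopA : List Int → Int → Int → Int
  | [], _, minIds => minIds
  | c :: rest, m, minIds => if m ≥ c then dpLoopA rest (m - c) (minIds - 1) else minIds

def deleteProducts (ids : List Int) (m : Int) : Int :=
  let idCounts := PySem.Dict.counter ids
  let sortedCounts := PySem.List.sorted idCounts.values (fun x => x) false
  dpLoopA sortedCounts m (sortedCounts.length : Int)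

-- ===== PORT B =====
-- inner 'for _ in range(freq_of_freq[f])': Sum.inr k models B's early 'return min_ids'
def dpInnerB (f : Int) : Nat → Int → Int → (Int × Int) ⊕ Int
  | 0, m, minIds => Sum.inl (m, minIds)
  | n + 1, m, minIds =>
      if m ≥ f then dpInnerB f n (m - f) (minIds - 1) else Sum.inr minIds

-- outer 'for f in range(1, max_f + 1)'
def dpOuterB (ff : PySem.Dict Int Int) : List Int → Int → Int → Int
  | [], _, minIds => minIds
  | f :: fs, m, minIds =>
      match dpInnerB f (ff.getD f 0).toNat m minIds with
      | Sum.inl (m', k') => dpOuterB ff fs m' k'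
      | Sum.inr k => k

def deleteProducts_alt (ids : List Int) (m : Int) : Int :=
  let idCounts := PySem.Dict.counter ids
  let freqOfFreq := PySem.Dict.counter idCounts.values
  let minIds : Int := (idCounts.size : Int)
  let maxF := PySem.List.maxD idCounts.values (fun x => x) 0
  dpOuterB freqOfFreq (PySem.List.pyRange 1 (maxF + 1)) m minIds

-- ===== PRECONDITION & SPEC =====
def Spec_deleteProducts (ids : List Int) (m : Int) (out : Int) : Prop := out = deleteProducts_alt ids m
instance (ids : List Int) (m : Int) (out : Int) : Decidable (Spec_deleteProducts ids m out) := by unfold Spec_deleteProducts; infer_instance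

-- ===== CLAIM (what is proved, stated in full; the proofs are below) =====
def Claim_equal_deleteProducts : Prop := ∀ (ids : List Int) (m : Int), Dom_deleteProducts ids m → Spec_deleteProducts ids m (deleteProducts ids m)

-- ===== LEMMAS AND PROOFS =====

-- B's inner loop over one bucket is A's loop over a block of n equal counts
theorem dpInnerB_block (f : Int) (n : Nat) : ∀ (rest : List Int) (m k : Int),
    dpLoopA (List.replicate n f ++ rest) m k =
      (match dpInnerB f n m k with
       | Sum.inl (m', k') => dpLoopA rest m' k'
       | Sum.inr k' => k') := by
  induction n with
  | zero => intro rest m k; simp [dpInnerB]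
  | succ n ih =>
      intro rest m k
      simp only [List.replicate_succ, List.cons_append, dpLoopA, dpInnerB]
      by_cases h : m ≥ f
      · simp [h, ih]
      · simp [h]

-- B's nested loops are A's loop over the concatenation of the buckets
theorem dpOuterB_flat (ff : PySem.Dict Int Int) : ∀ (fs : List Int) (m k : Int),
    dpOuterB ff fs m k =
      dpLoopA (fs.flatMap (fun f => List.replicate (ff.getD f 0).toNat f)) m k := by
  intro fs
  induction fs with
  | nil => intro m k; simp [dpOuterB, dpLoopA]
  | cons f fs ih =>
      intro m k
      simp only [dpOuterB, List.flatMap_cons]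
      rw [dpInnerB_block]
      cases hi : dpInnerB f (ff.getD f 0).toNat m k with
      | inl p => simp [ih]
      | inr k' => simp

-- counting elements of the concatenated buckets, for a Nodup list of bucket labels
theorem count_flat_replicate (cnt : Int → Nat) (x : Int) : ∀ (fs : List Int), fs.Nodup →
    (fs.flatMap (fun f => List.replicate (cnt f) f)).count x =
      if x ∈ fs then cnt x else 0 := by
  intro fs
  induction fs with
  | nil => simp
  | cons f fs ih =>
      intro hnd
      rcases List.nodup_cons.mp hnd with ⟨hf, hnd'⟩
      simp only [List.flatMap_cons, List.count_append, List.count_replicate, ih hnd',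
        List.mem_cons]
      by_cases hx : x = f
      · subst hx; simp [hf]
      · simp [hx, Ne.symm hx]

-- the concatenated buckets are pairwise ≤ when the labels are pairwise <
theorem pairwise_flat_replicate (cnt : Int → Nat) : ∀ (fs : List Int),
    fs.Pairwise (· < ·) →
    (fs.flatMap (fun f => List.replicate (cnt f) f)).Pairwise (· ≤ ·) := by
  intro fs
  induction fs with
  | nil => simp
  | cons f fs ih =>
      intro hp
      rcases List.pairwise_cons.mp hp with ⟨hlt, hp'⟩
      simp only [List.flatMap_cons]
      rw [List.pairwise_append]
      refine ⟨List.pairwise_replicate.mpr (Or.inr le_rfl), ih hp', ?_⟩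
      intro a ha b hb
      rcases List.eq_of_mem_replicate ha with rfl
      rcases List.mem_flatMap.mp hb with ⟨g, hg, hbg⟩
      rcases List.eq_of_mem_replicate hbg with rfl
      exact le_of_lt (hlt _ hg)

-- every value of Counter(ids) is a positive count
theorem counter_values_pos (ids : List Int) :
    ∀ c ∈ (PySem.Dict.counter ids).values, 1 ≤ c := by
  intro c hc
  rw [PySem.Dict.values_eq_map_keys _ (PySem.Dict.nodup_keys_counter ids) 0] at hc
  rcases List.mem_map.mp hc with ⟨k, hk, rfl⟩
  rw [PySem.Dict.keys_counter, PySem.Set.mem_ofList] at hk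
  rw [PySem.Dict.getD_counter]
  exact_mod_cast List.count_pos_iff.mpr hk

-- every value is bounded by max(values, default=0)
theorem counter_values_le_maxD (vs : List Int) :
    ∀ c ∈ vs, c ≤ PySem.List.maxD vs (fun x => x) 0 := by
  intro c hc
  unfold PySem.List.maxD
  cases hm : PySem.List.max? vs (fun x => x) with
  | none => rw [PySem.List.max?_eq_none_iff] at hm; subst hm; cases hc
  | some w => exact PySem.List.max?_isMax hm c hc

-- the bucket list B iterates over IS A's sorted list of counts
theorem flat_buckets_eq_sorted (vs : List Int)
    (hpos : ∀ c ∈ vs, 1 ≤ c)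
    (hle : ∀ c ∈ vs, c ≤ PySem.List.maxD vs (fun x => x) 0) :
    (PySem.List.pyRange 1 (PySem.List.maxD vs (fun x => x) 0 + 1)).flatMap
        (fun f => List.replicate ((PySem.Dict.counter vs).getD f 0).toNat f) =
      PySem.List.sorted vs (fun x => x) false := by
  apply PySem.List.eq_of_perm_of_pairwise_le_of_injective (key := fun x => x)
    (Function.injective_id)
  · -- permutation: equal counts everywhere
    refine List.Perm.trans (List.perm_iff_count.mpr ?_) (PySem.List.sorted_perm vs _ _).symm
    intro x
    rw [count_flat_replicate _ x _ (PySem.List.nodup_pyRange_one _ _)]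
    by_cases hx : x ∈ PySem.List.pyRange 1 (PySem.List.maxD vs (fun x => x) 0 + 1)
    · simp [hx]
    · simp only [hx, if_false]
      by_cases hxv : x ∈ vs
      · exact absurd (PySem.List.mem_pyRange_one.mpr
          ⟨hpos x hxv, by have := hle x hxv; omega⟩) hx
      · exact (List.count_eq_zero.mpr hxv).symm
  · exact pairwise_flat_replicate _ _ (PySem.List.pairwise_lt_pyRange_one _ _)
  · exact PySem.List.sorted_pairwise vs (fun x => x)

-- ===== VERDICT (by name: the statement is the Claim_ definition above) =====
theorem deleteProducts_spec : Claim_equal_deleteProducts := by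
  intro ids m _
  unfold Spec_deleteProducts deleteProducts deleteProducts_alt
  simp only
  rw [dpOuterB_flat,
    flat_buckets_eq_sorted _ (counter_values_pos ids)
      (counter_values_le_maxD (PySem.Dict.counter ids).values),
    PySem.List.length_sorted]
  congr 1
  simp [PySem.Dict.values, PySem.Dict.size]
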